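-- pv_equiv track=rewrite | github.com/DatametTeam/demo_sole | src/sole24oredemo/sou_py/dpg/tree.py | searchSpecialChar
-- ===== SOURCE A (Python) =====
-- def searchSpecialChar(text: str) -> int:
--     """
--     Searches for the first occurrence of any special character in a given text.
--
--     This function scans through 'text' to find the first occurrence of any predefined special character.
--     The special characters considered are: '$', ':', '.', '@', '/', '\\', '-'. It returns the position
--     of the first special character found. If none of these characters are present in 'text', the function
--     returns -1.
--
--     Args:
--         text (str): The text string in which to search for special characters.
--
--     Returns:
--         int: The index of the first occurrence of a special character in 'text', or -1 if none are found.
--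
--     Note:
--         The function searches for the characters sequentially and returns the position of the first one
--         it encounters. If no special characters from the defined set are found in 'text', -1 is returned.
--     """
--
--     """
--     - Python has a built-in method for strings called find, which is used instead of IDL's strpos.
--         The find method returns the lowest index of the substring (if found).
--         If not found, it returns -1.
--     - The condition to check if ppp is greater than or equal to 0 is retained,
--         as Python's find method also returns -1 if the substring is not found.
--     - The check if posS is greater than the length of the text to return -1 is also maintained in the Python version.
--     - The special characters array is modified to be more Pythonic,
--         replacing special = [...] with special_chars = [...].
--     - The for loop is modified to iterate directly over the special characters,
--         rather than using an index, making the code more Pythonic.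
--     """
--     if not isinstance(text, str):
--         return -1
--     special_chars = ["$", ":", ".", "@", "/", "\\", "-"]
--     pos = len(text)  # Initial position set to length of the text
--
--     # Search for each special character in the text
--     for char in special_chars:
--         p = text.find(char)
--         if 0 <= p < pos:
--             pos = p
--
--     # If no special character is found, return -1
--     if pos == len(text):
--         return -1
--
--     return pos
-- ===== SOURCE B (Python) =====
-- def searchSpecialChar(text: str) -> int:
--     if not isinstance(text, str):
--         return -1
--     specials = {"$", ":", ".", "@", "/", "\\", "-"}
--     for i, ch in enumerate(text):
--         if ch in specials:
--             return i
--     return -1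
-- ===== Notes on version B (the rewrite author's own statement) =====
-- stated objective: idiomatic
-- what changed: Single left-to-right pass over the text with early exit on the first character in a fixed 7-char set, instead of seven full str.find scans minimized together.
import Mathlib
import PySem

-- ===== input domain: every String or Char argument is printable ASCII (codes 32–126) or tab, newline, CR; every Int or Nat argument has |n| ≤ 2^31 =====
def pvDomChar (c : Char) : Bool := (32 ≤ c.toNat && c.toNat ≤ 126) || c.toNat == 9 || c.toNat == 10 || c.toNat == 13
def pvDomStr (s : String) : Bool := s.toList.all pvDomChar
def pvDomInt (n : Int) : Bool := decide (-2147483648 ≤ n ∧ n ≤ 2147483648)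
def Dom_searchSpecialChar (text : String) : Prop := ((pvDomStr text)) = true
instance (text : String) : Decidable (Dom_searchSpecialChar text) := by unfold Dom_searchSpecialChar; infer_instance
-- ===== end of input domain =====

-- B replaces A's seven full str.find scans by one left-to-right pass with early exit (idiomatic; same asymptotic cost).

-- ===== PORT A =====
def searchSpecialChar (text : String) : Int :=
  let specialChars : List String := ["$", ":", ".", "@", "/", "\\", "-"]
  let pos : Int := specialChars.foldl
    (fun pos ch =>
      let p := PySem.Str.find text ch
      if 0 ≤ p ∧ p < pos then p else pos)
    (PySem.Str.len text)
  if pos = PySem.Str.len text then -1 else pos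

-- ===== PORT B =====
def pvSpecials : List Char := ['$', ':', '.', '@', '/', '\\', '-']

def pvScan : List Char → Nat → Int
  | [], _ => -1
  | c :: rest, i => if c ∈ pvSpecials then (i : Int) else pvScan rest (i + 1)

def searchSpecialChar_alt (text : String) : Int := pvScan text.toList 0

-- ===== PRECONDITION & SPEC =====
def Spec_searchSpecialChar (text : String) (out : Int) : Prop := out = searchSpecialChar_alt text
instance (text : String) (out : Int) : Decidable (Spec_searchSpecialChar text out) := by unfold Spec_searchSpecialChar; infer_instance

-- ===== CLAIM (what is proved, stated in full; the proofs are below) =====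
def Claim_equal_searchSpecialChar : Prop := ∀ (text : String), Dom_searchSpecialChar text → Spec_searchSpecialChar text (searchSpecialChar text)

-- ===== LEMMAS AND PROOFS =====

-- F cs c : index of first occurrence of single char c in cs (as Python find), -1 if absent
def pvF (cs : List Char) (c : Char) : Int := PySem.Chars.find cs [c]

def pvStep (cs : List Char) (pos : Int) (c : Char) : Int :=
  if 0 ≤ pvF cs c ∧ pvF cs c < pos then pvF cs c else pos

lemma singleton_prefix_iff (c : Char) (l : List Char) : [c] <+: l ↔ l[0]? = some c := by
  cases l with
  | nil => simp
  | cons d t => simp [List.cons_prefix_cons, eq_comm]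

lemma singleton_prefix_drop_iff (c : Char) (cs : List Char) (i : Nat) :
    [c] <+: cs.drop i ↔ cs[i]? = some c := by
  rw [singleton_prefix_iff, List.getElem?_drop, Nat.add_zero]

lemma pvF_nonneg_iff (cs : List Char) (c : Char) : 0 ≤ pvF cs c ↔ c ∈ cs := by
  rw [pvF, PySem.Chars.find_nonneg_iff]
  constructor
  · intro h; have := h.sublist; simpa using this
  · intro h
    obtain ⟨s, t, rfl⟩ := List.append_of_mem h
    exact ⟨s, t, by simp⟩

-- the fold only decreases
lemma fold_le_init (cs : List Char) (S : List Char) (init : Int) :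
    S.foldl (pvStep cs) init ≤ init := by
  induction S generalizing init with
  | nil => simp
  | cons c S ih =>
    simp only [List.foldl_cons]
    refine le_trans (ih _) ?_
    unfold pvStep; split_ifs with h
    · exact le_of_lt h.2
    · exact le_refl _

lemma fold_le_mem (cs : List Char) (S : List Char) (init : Int) (c : Char)
    (hc : c ∈ S) (h0 : 0 ≤ pvF cs c) :
    S.foldl (pvStep cs) init ≤ pvF cs c := by
  induction S generalizing init with
  | nil => simp at hc
  | cons d S ih =>
    simp only [List.foldl_cons]
    rcases List.mem_cons.mp hc with rfl | hc'
    · refine le_trans (fold_le_init cs S _) ?_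
      unfold pvStep; split_ifs with h
      · exact le_refl _
      · push_neg at h; exact h h0
    · exact ih _ hc'

lemma fold_choice (cs : List Char) (S : List Char) (init : Int) :
    S.foldl (pvStep cs) init = init ∨
      ∃ c ∈ S, S.foldl (pvStep cs) init = pvF cs c ∧ 0 ≤ pvF cs c := by
  induction S generalizing init with
  | nil => left; simp
  | cons d S ih =>
    simp only [List.foldl_cons]
    rcases ih (pvStep cs init d) with h | ⟨c, hc, h, h0⟩
    · rw [h]; unfold pvStep; split_ifs with hd
      · right; exact ⟨d, List.mem_cons_self, rfl, hd.1⟩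
      · left; rfl
    · right; exact ⟨c, List.mem_cons_of_mem _ hc, h, h0⟩

-- characterisation of B's scan
lemma pvScan_eq (cs : List Char) (i : Nat) :
    pvScan cs i = if cs.any (fun c => c ∈ pvSpecials) then
        ((i + cs.findIdx (fun c => c ∈ pvSpecials) : Nat) : Int) else -1 := by
  induction cs generalizing i with
  | nil => simp [pvScan]
  | cons c rest ih =>
    by_cases hc : c ∈ pvSpecials
    · simp [pvScan, hc, List.findIdx_cons]
    · rw [pvScan, if_neg hc, ih (i + 1)]
      simp only [List.any_cons, List.findIdx_cons, hc, decide_false, Bool.false_or,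
        cond_false]
      split_ifs with h
      · push_cast; ring
      · rfl

-- rewrite port A's fold over literal strings as the char fold
lemma portA_eq (text : String) :
    searchSpecialChar text =
      (if pvSpecials.foldl (pvStep text.toList) (text.toList.length : Int)
          = (text.toList.length : Int) then -1
       else pvSpecials.foldl (pvStep text.toList) (text.toList.length : Int)) := by
  unfold searchSpecialChar pvSpecials
  simp [List.foldl_cons, pvStep, pvF, PySem.Str.find_eq, PySem.Str.len_eq]

theorem searchSpecialChar_spec : Claim_equal_searchSpecialChar := by
  intro text _
  unfold Spec_searchSpecialChar searchSpecialChar_alt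
  rw [portA_eq, pvScan_eq]
  set cs := text.toList with hcs
  by_cases hany : cs.any (fun c => c ∈ pvSpecials)
  · simp only [hany, if_true]
    rw [List.any_eq_true] at hany
    obtain ⟨c0, hc0mem, hc0spec⟩ := hany
    simp only [decide_eq_true_eq] at hc0spec
    set j := cs.findIdx (fun c => c ∈ pvSpecials) with hj
    have hjlt : j < cs.length := List.findIdx_lt_length_of_exists ⟨c0, hc0mem, by simpa using hc0spec⟩
    have hjget : cs[j]'hjlt ∈ pvSpecials := by
      have := List.findIdx_getElem (w := hjlt) (xs := cs) (p := fun c => c ∈ pvSpecials)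
      simpa using this
    set m := pvSpecials.foldl (pvStep cs) (cs.length : Int) with hm
    -- m ≤ j
    have hFj0 : 0 ≤ pvF cs (cs[j]'hjlt) := (pvF_nonneg_iff _ _).mpr (cs.getElem_mem hjlt)
    have hspec := PySem.Chars.find_spec (s := cs) (sub := [cs[j]'hjlt]) (by exact hFj0)
    have hkj : (pvF cs (cs[j]'hjlt)).toNat ≤ j := by
      by_contra h
      push_neg at h
      exact hspec.2 j h ((singleton_prefix_drop_iff _ _ _).mpr (by simp))
    have hmj : m ≤ (j : Int) := by
      refine le_trans (fold_le_mem cs pvSpecials _ _ hjget hFj0) ?_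
      omega
    -- j ≤ m
    have hjm : (j : Int) ≤ m := by
      rcases fold_choice cs pvSpecials (cs.length : Int) with h | ⟨c, hcS, h, h0⟩
      · exfalso
        have hml : m = (cs.length : Int) := hm.trans h
        omega
      · have hspec' := PySem.Chars.find_spec (s := cs) (sub := [c]) (by exact h0)
        have hget : cs[(pvF cs c).toNat]? = some c :=
          (singleton_prefix_drop_iff _ _ _).mp hspec'.1
        have hlt : (pvF cs c).toNat < cs.length := by
          by_contra hge
          push_neg at hge
          rw [List.getElem?_eq_none hge] at hget
          simp at hget
        have hgc : cs[(pvF cs c).toNat]'hlt = c := by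
          have h' := List.getElem?_eq_getElem (l := cs) hlt
          rw [h'] at hget; exact Option.some.inj hget
        have hle : cs.findIdx (fun x => decide (x ∈ pvSpecials)) ≤ (pvF cs c).toNat := by
          by_contra hlt2
          push_neg at hlt2
          exact absurd (by simp [hgc, hcS] :
              (fun x => decide (x ∈ pvSpecials)) (cs[(pvF cs c).toNat]'hlt) = true)
            (by simpa using List.not_of_lt_findIdx hlt2)
        have hm2 : m = pvF cs c := hm.trans h
        omega
    have hmeq : m = (j : Int) := le_antisymm hmj hjm
    rw [hmeq]
    have : (j : Int) ≠ (cs.length : Int) := by omega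
    simp [this]
  · -- no special char: all finds are -1, fold stays at length
    simp only [hany, Bool.false_eq_true, if_false]
    have hall : ∀ c ∈ pvSpecials, ¬ (0 ≤ pvF cs c) := by
      intro c hc h
      rw [pvF_nonneg_iff] at h
      simp only [Bool.not_eq_true, List.any_eq_false] at hany
      have := hany c h
      simp [hc] at this
    have hfold : pvSpecials.foldl (pvStep cs) (cs.length : Int) = (cs.length : Int) := by
      rcases fold_choice cs pvSpecials (cs.length : Int) with h | ⟨c, hc, _, h0⟩
      · exact h
      · exact absurd h0 (hall c hc)
    simp [hfold]
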